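-- pv_equiv track=rewrite | github.com/derektolliver/spectral-jellyfish | interview/python/dynamic_palindrome.py | contains_consecutive_ones
-- ===== SOURCE A (Python) =====
-- def contains_consecutive_ones(k, base_two_num):
--     index = 0
--     count = 0
--     while index < len(base_two_num) and count < k:
--         if base_two_num[index] == '1':
--             count += 1
--         else:
--             count = 0
--         index += 1
--     if count >= k:
--         return True
--     return False
-- ===== SOURCE B (Python) =====
-- def contains_consecutive_ones(k, base_two_num):
--     if k > len(base_two_num):
--         return False
--     return '1' * k in base_two_num
-- ===== Notes on version B (the rewrite author's own statement) =====
-- stated objective: simpler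
-- what changed: Replaces the explicit index/count scanning loop with a single substring-containment test '1' * k in base_two_num (guarded by k > len(s) -> False), using Python's built-in substring search.
import Mathlib
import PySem

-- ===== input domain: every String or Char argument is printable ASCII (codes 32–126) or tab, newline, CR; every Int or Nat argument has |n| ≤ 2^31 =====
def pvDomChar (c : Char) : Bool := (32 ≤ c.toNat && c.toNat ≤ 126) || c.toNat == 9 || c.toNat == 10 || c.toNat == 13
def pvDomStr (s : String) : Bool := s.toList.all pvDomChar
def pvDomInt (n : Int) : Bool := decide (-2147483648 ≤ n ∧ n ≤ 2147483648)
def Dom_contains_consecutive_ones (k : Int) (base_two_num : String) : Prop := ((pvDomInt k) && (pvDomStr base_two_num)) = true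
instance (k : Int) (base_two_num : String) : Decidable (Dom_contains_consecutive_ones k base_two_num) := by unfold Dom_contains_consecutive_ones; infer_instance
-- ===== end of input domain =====

-- B replaces A's explicit index/count scanning loop with one substring-containment test ('1'*k in s); objective: simpler.

-- ===== PORT A =====
-- the while loop over index/count, as structural recursion over the remaining characters with the count accumulator
def pvLoopA (k : Int) : List Char → Int → Int
  | [], count => count
  | ch :: rest, count =>
      if count < k then pvLoopA k rest (if ch == '1' then count + 1 else 0)
      else count

def contains_consecutive_ones (k : Int) (base_two_num : String) : Bool :=
  if k ≤ pvLoopA k base_two_num.toList 0 then true else false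

-- ===== PORT B =====
def contains_consecutive_ones_alt (k : Int) (base_two_num : String) : Bool :=
  if (base_two_num.toList.length : Int) < k then false
  else PySem.Chars.isIn (PySem.List.pyRepeat ['1'] k) base_two_num.toList

-- ===== PRECONDITION & SPEC =====
def Spec_contains_consecutive_ones (k : Int) (base_two_num : String) (out : Bool) : Prop := out = contains_consecutive_ones_alt k base_two_num
instance (k : Int) (base_two_num : String) (out : Bool) : Decidable (Spec_contains_consecutive_ones k base_two_num out) := by unfold Spec_contains_consecutive_ones; infer_instance

-- ===== CLAIM (what is proved, stated in full; the proofs are below) =====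
def Claim_equal_contains_consecutive_ones : Prop := ∀ (k : Int) (base_two_num : String), Dom_contains_consecutive_ones k base_two_num → Spec_contains_consecutive_ones k base_two_num (contains_consecutive_ones k base_two_num)

-- ===== LEMMAS AND PROOFS =====

lemma replicate_prefix_mono {m n : Nat} (a : Char) {t : List Char} (h : m ≤ n)
    (hp : List.replicate n a <+: t) : List.replicate m a <+: t := by
  refine List.IsPrefix.trans ?_ hp
  exact ⟨List.replicate (n - m) a, by rw [← List.replicate_add, Nat.add_sub_cancel' h]⟩

lemma replicate_prefix_cons {n : Nat} (hn : 0 < n) (a ch : Char) (t : List Char) :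
    (List.replicate n a <+: ch :: t) ↔ (a = ch ∧ List.replicate (n - 1) a <+: t) := by
  obtain ⟨m, rfl⟩ := Nat.exists_eq_add_of_lt hn
  simp [List.replicate_succ, List.cons_prefix_cons]

lemma infix_cons_iff (sub : List Char) (ch : Char) (t : List Char) :
    (sub <:+: ch :: t) ↔ (sub <+: ch :: t) ∨ (sub <:+: t) := by
  constructor
  · rintro ⟨pre, suf, h⟩
    cases pre with
    | nil => exact Or.inl ⟨suf, by simpa using h⟩
    | cons p ps =>
        right
        refine ⟨ps, suf, ?_⟩
        simpa using congrArg List.tail h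
  · rintro (⟨suf, h⟩ | hi)
    · exact ⟨[], suf, by simpa using h⟩
    · exact hi.trans ⟨[ch], [], by simp⟩

-- main invariant: for 0 < k and 0 ≤ count < k, the loop finishes with count' ≥ k
-- exactly when a run of (k - count) ones starts immediately, or k consecutive ones occur later
lemma loopA_spec (k : Int) (hk : 0 < k) :
    ∀ (l : List Char) (c : Int), 0 ≤ c → c < k →
      ((k ≤ pvLoopA k l c) ↔
        (List.replicate (k - c).toNat '1' <+: l ∨ List.replicate k.toNat '1' <:+: l)) := by
  intro l
  induction l with
  | nil =>
      intro c hc0 hck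
      simp only [pvLoopA]
      constructor
      · intro h; omega
      · rintro (hp | hi)
        · have := hp.length_le
          simp at this
          omega
        · have := hi.length_le
          simp at this
          omega
  | cons ch t ih =>
      intro c hc0 hck
      have hkc : 0 < (k - c).toNat := by omega
      have hkk : 0 < k.toNat := by omega
      simp only [pvLoopA, if_pos hck]
      by_cases hch : ch = '1'
      · subst hch
        rw [show (if ('1' == '1' : Bool) then c + 1 else 0) = c + 1 from by simp]
        rw [replicate_prefix_cons hkc, infix_cons_iff,
            replicate_prefix_cons hkk]
        by_cases hce : c + 1 = k
        · -- the loop hits count = k and stops with count = k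
          have hstop : pvLoopA k t (c + 1) = c + 1 := by
            cases t with
            | nil => simp [pvLoopA]
            | cons x xs => simp [pvLoopA, hce]
          rw [hstop]
          have : (k - c).toNat - 1 = 0 := by omega
          simp [this, hce]
        · rw [ih (c + 1) (by omega) (by omega)]
          constructor
          · rintro (hp | hi)
            · left
              refine ⟨rfl, ?_⟩
              have : (k - c).toNat - 1 = (k - (c + 1)).toNat := by omega
              rw [this]; exact hp
            · right; right; exact hi
          · rintro (⟨-, hp⟩ | ⟨-, hp⟩ | hi)
            · left
              have : (k - c).toNat - 1 = (k - (c + 1)).toNat := by omega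
              rwa [this] at hp
            · left
              exact replicate_prefix_mono '1' (by omega) hp
            · right; exact hi
      · rw [show (if (ch == '1' : Bool) then c + 1 else 0) = 0 from by simp [hch]]
        rw [ih 0 le_rfl hk]
        have hsub0 : (k - (0:Int)).toNat = k.toNat := by omega
        rw [hsub0, infix_cons_iff]
        constructor
        · rintro (hp | hi)
          · right; right; exact hp.isInfix
          · right; right; exact hi
        · rintro (hp | hp | hi)
          · exact absurd ((replicate_prefix_cons hkc '1' ch t).mp hp).1 (fun h => hch h.symm)
          · exact absurd ((replicate_prefix_cons hkk '1' ch t).mp hp).1 (fun h => hch h.symm)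
          · right; exact hi

lemma loopA_nonpos (k : Int) (hk : k ≤ 0) (l : List Char) : pvLoopA k l 0 = 0 := by
  cases l with
  | nil => simp [pvLoopA]
  | cons ch t =>
      have h : ¬ ((0:Int) < k) := by omega
      simp [pvLoopA, h]

-- ===== VERDICT (by name: the statement is the Claim_ definition above) =====
theorem contains_consecutive_ones_spec : Claim_equal_contains_consecutive_ones := by
  intro k s _
  unfold Spec_contains_consecutive_ones contains_consecutive_ones contains_consecutive_ones_alt
  rw [PySem.List.pyRepeat_singleton]
  by_cases hk : k ≤ 0
  · have hk0 : k.toNat = 0 := by omega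
    have hlen : ¬ ((s.toList.length : Int) < k) := by
      have : (0:Int) ≤ s.toList.length := by positivity
      omega
    rw [loopA_nonpos k hk, if_pos hk, if_neg hlen, hk0, List.replicate_zero]
    exact (PySem.Chars.isIn_nil _).symm
  · replace hk : 0 < k := by omega
    by_cases hlen : (s.toList.length : Int) < k
    · rw [if_pos hlen]
      have h := loopA_spec k hk s.toList 0 le_rfl hk
      have hnle : ¬ (k ≤ pvLoopA k s.toList 0) := by
        intro hle
        rcases h.mp hle with hp | hi
        · have := hp.length_le; rw [List.length_replicate] at this; omega
        · have := hi.length_le; rw [List.length_replicate] at this; omega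
      rw [if_neg hnle]
    · rw [if_neg hlen]
      have h := loopA_spec k hk s.toList 0 le_rfl hk
      have hsub0 : (k - (0:Int)).toNat = k.toNat := by omega
      rw [hsub0] at h
      by_cases hle : k ≤ pvLoopA k s.toList 0
      · rw [if_pos hle]
        rcases h.mp hle with hp | hi
        · exact ((PySem.Chars.isIn_iff_infix _ _).mpr hp.isInfix).symm
        · exact ((PySem.Chars.isIn_iff_infix _ _).mpr hi).symm
      · rw [if_neg hle]
        rcases hin : PySem.Chars.isIn (List.replicate k.toNat '1') s.toList with _ | _
        · rfl
        · exact absurd (h.mpr (Or.inr ((PySem.Chars.isIn_iff_infix _ _).mp hin))) hle
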